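-- pv_equiv track=rewrite | github.com/qtangcpu/Leetcode_Practice | Practice. Indicators.py | indicators
-- ===== SOURCE A (Python) =====
-- def indicators(arr):
--     indicator1 = 0
--     indicator2 = 0
--     left = 0
--     right = 0
--     while right < len(arr):
--         while right < len(arr) and arr[right] == arr[left]:
--             right += 1
--
--         if right-left ==arr[left]:
--             indicator1 +=1
--             if left+1 ==arr[left]:
--                 indicator2 +=1
--         left = right
--     return indicator1-indicator2
-- ===== SOURCE B (Python) =====
-- def indicators(arr):
--     # For every position s, test directly (by re-reading a window of the list)
--     # whether a maximal run of exactly arr[s] copies of arr[s] starts at s,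
--     # and count those not starting at index arr[s]-1.  No run-length encoding,
--     # no two pointers: a per-position window predicate summed over range(n).
--     n = len(arr)
--
--     def counted_start(s):
--         v = arr[s]
--         if s > 0 and arr[s - 1] == v:
--             return False              # s is not the first element of its run
--         if v < 1 or s + v > n:
--             return False              # a run of length v cannot fit at s
--         if any(arr[j] != v for j in range(s, s + v)):
--             return False              # the v elements from s are not all v
--         if s + v < n and arr[s + v] == v:
--             return False              # the run is longer than v
--         return s != v - 1             # exclude runs starting at index v-1
--
--     return sum(1 for s in range(n) if counted_start(s))
-- ===== Notes on version B (the rewrite author's own statement) =====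
-- stated objective: alternative
-- what changed: Replaces A's two-pointer run-length scan with mutable counters by a per-position window predicate: for each index s it tests locally whether a maximal run of exactly arr[s] copies of arr[s] starts at s (and s != arr[s]-1), and sums that predicate over range(n); no pointers or run bookkeeping are maintained.
import Mathlib
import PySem

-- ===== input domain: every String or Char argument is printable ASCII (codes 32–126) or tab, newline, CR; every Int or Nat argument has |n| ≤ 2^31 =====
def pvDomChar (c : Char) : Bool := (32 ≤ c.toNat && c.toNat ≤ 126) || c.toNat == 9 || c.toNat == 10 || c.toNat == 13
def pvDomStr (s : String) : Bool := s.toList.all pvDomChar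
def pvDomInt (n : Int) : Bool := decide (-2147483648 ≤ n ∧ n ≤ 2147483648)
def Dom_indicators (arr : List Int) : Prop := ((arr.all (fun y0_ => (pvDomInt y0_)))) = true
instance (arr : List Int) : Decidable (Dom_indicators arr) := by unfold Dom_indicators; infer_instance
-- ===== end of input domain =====

-- B tests a per-position window predicate instead of A's two-pointer run scan (alternative decomposition, no speed claim).

-- ===== PORT A =====
-- inner while loop: advances `right` while right < len(arr) and arr[right] == arr[left]
-- (arr[left] is constant during the inner loop, passed as v; all index accesses are in range like in Python)
def innerA (arr : List Int) (v : Int) (right : Nat) : Nat :=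
  if h : right < arr.length then
    if arr[right] = v then innerA arr v (right + 1) else right
  else right
termination_by arr.length - right

theorem innerA_ge (arr : List Int) (v : Int) (right : Nat) : right ≤ innerA arr v right := by
  unfold innerA
  split
  · split
    · have := innerA_ge arr v (right + 1); omega
    · exact le_refl _
  · exact le_refl _
termination_by arr.length - right

theorem innerA_gt (arr : List Int) (left : Nat) (h : left < arr.length) :
    left < innerA arr arr[left] left := by
  unfold innerA
  rw [dif_pos h, if_pos rfl]
  have := innerA_ge arr arr[left] (left + 1)
  omega

-- outer while loop; the tests 'right-left == arr[left]' and 'left+1 == arr[left]' (the latter nested in the former) are written out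
def outerA (arr : List Int) (i1 i2 : Int) (left : Nat) : Int :=
  if h : left < arr.length then
    outerA arr
      (if ((innerA arr arr[left] left : Int) - (left : Int)) = arr[left] then i1 + 1 else i1)
      (if ((innerA arr arr[left] left : Int) - (left : Int)) = arr[left] ∧ (left : Int) + 1 = arr[left] then i2 + 1 else i2)
      (innerA arr arr[left] left)
  else i1 - i2
termination_by arr.length - left
decreasing_by
  have := innerA_gt arr left h
  omega

def indicators (arr : List Int) : Int := outerA arr 0 0 0

-- ===== PORT B =====
-- counted_start(s): every arr[...] access Source B makes is in range when s < len(arr), so List.getD _ _ 0 is exact there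
def bGood (arr : List Int) (s : Nat) : Bool :=
  let n := arr.length
  let v := arr.getD s 0
  if decide (0 < s) && (arr.getD (s - 1) 0 == v) then false
  else if decide (v < 1) || decide ((s : Int) + v > (n : Int)) then false
  else if (List.range' s v.toNat).any (fun j => !(arr.getD j 0 == v)) then false
  else if decide ((s : Int) + v < (n : Int)) && (arr.getD (s + v.toNat) 0 == v) then false
  else decide ((s : Int) ≠ v - 1)

-- sum(1 for s in range(n) if counted_start(s))
def indicators_alt (arr : List Int) : Int :=
  (((List.range arr.length).countP (fun s => bGood arr s) : Nat) : Int)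

-- ===== PRECONDITION & SPEC =====
def Spec_indicators (arr : List Int) (out : Int) : Prop := out = indicators_alt arr
instance (arr : List Int) (out : Int) : Decidable (Spec_indicators arr out) := by unfold Spec_indicators; infer_instance

-- ===== CLAIM (what is proved, stated in full; the proofs are below) =====
def Claim_equal_indicators : Prop := ∀ (arr : List Int), Dom_indicators arr → Spec_indicators arr (indicators arr)

-- ===== LEMMAS AND PROOFS =====

-- number of leading elements equal to v
def leadCount (v : Int) : List Int → Nat
  | [] => 0
  | x :: xs => if x = v then leadCount v xs + 1 else 0

theorem leadCount_le (v : Int) (l : List Int) : leadCount v l ≤ l.length := by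
  induction l with
  | nil => simp [leadCount]
  | cons x xs ih =>
    simp only [leadCount]
    split
    · simpa using ih
    · simp

theorem leadCount_eq (v : Int) (l : List Int) : ∀ j, j < leadCount v l → l.getD j 0 = v := by
  induction l with
  | nil => simp [leadCount]
  | cons x xs ih =>
    intro j hj
    simp only [leadCount] at hj
    split at hj
    case isTrue hx =>
      cases j with
      | zero => simpa using hx
      | succ j => simpa using ih j (by omega)
    case isFalse => omega

theorem leadCount_ne (v : Int) (l : List Int) (h : leadCount v l < l.length) :
    l.getD (leadCount v l) 0 ≠ v := by
  induction l with
  | nil => simp [leadCount] at h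
  | cons x xs ih =>
    simp only [leadCount] at *
    split
    case isTrue hx =>
      rw [if_pos hx] at h
      simpa using ih (by simpa using h)
    case isFalse hx => simpa using hx

theorem innerA_eq (arr : List Int) (v : Int) (right : Nat) :
    innerA arr v right = right + leadCount v (arr.drop right) := by
  unfold innerA
  split
  case isTrue h =>
    rw [List.drop_eq_getElem_cons h]
    split
    case isTrue hv =>
      rw [innerA_eq arr v (right + 1), leadCount, if_pos hv]
      omega
    case isFalse hv =>
      rw [leadCount, if_neg hv]
      omega
  case isFalse h =>
    rw [List.drop_eq_nil_of_le (by omega)]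
    rw [leadCount]
    omega
termination_by arr.length - right

theorem getD_drop (arr : List Int) (m j : Nat) :
    (arr.drop m).getD j 0 = arr.getD (m + j) 0 := by
  simp [List.getD_eq_getElem?_getD, List.getElem?_drop]

-- the invariant: from a run boundary, the A loop adds exactly the number of good positions to the right
theorem outerA_count (arr : List Int) (i1 i2 : Int) (left : Nat)
    (HB : left = 0 ∨ arr.length ≤ left ∨ arr.getD (left - 1) 0 ≠ arr.getD left 0) :
    outerA arr i1 i2 left =
      i1 - i2 + (((List.range' left (arr.length - left)).countP (fun s => bGood arr s) : Nat) : Int) := by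
  unfold outerA
  split
  case isFalse h =>
    rw [show arr.length - left = 0 by omega]
    simp
  case isTrue h =>
    have hvv : arr.getD left 0 = arr[left] := by
      simp [List.getD_eq_getElem?_getD, List.getElem?_eq_getElem h]
    set v := arr[left] with hv
    set k := leadCount v (arr.drop (left + 1)) with hk
    have hd : arr.drop left = v :: arr.drop (left + 1) := List.drop_eq_getElem_cons h
    have hlead : leadCount v (arr.drop left) = k + 1 := by
      rw [hd, leadCount, if_pos rfl]
    have hin : innerA arr v left = left + (k + 1) := by rw [innerA_eq, hlead]
    have hle : left + (k + 1) ≤ arr.length := by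
      have h1 := leadCount_le v (arr.drop left)
      rw [hlead, List.length_drop] at h1
      omega
    have hrun : ∀ j, j < k + 1 → arr.getD (left + j) 0 = v := by
      intro j hj
      have h1 := leadCount_eq v (arr.drop left) j (by rw [hlead]; omega)
      rwa [getD_drop] at h1
    have hmax : left + (k + 1) < arr.length → arr.getD (left + (k + 1)) 0 ≠ v := by
      intro hlt
      have h1 := leadCount_ne v (arr.drop left) (by rw [hlead, List.length_drop]; omega)
      rwa [hlead, getD_drop] at h1
    have hsplit : List.range' left (arr.length - left) =
        List.range' left (k + 1) ++ List.range' (left + (k + 1)) (arr.length - (left + (k + 1))) := by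
      have h1 := @List.range'_append left (k + 1) (arr.length - (left + (k + 1))) 1
      simp only [one_mul] at h1
      rw [h1]
      congr 1
      omega
    have hint : (List.range' (left + 1) k).countP (fun s => bGood arr s) = 0 := by
      rw [List.countP_eq_zero]
      intro s hs
      rw [List.mem_range'] at hs
      obtain ⟨i, hi, rfl⟩ := hs
      simp only [one_mul]
      have h1 : arr.getD (left + 1 + i) 0 = v := by
        have h2 := hrun (i + 1) (by omega)
        rwa [show left + (i + 1) = left + 1 + i by omega] at h2
      have h2 : arr.getD (left + 1 + i - 1) 0 = v := by
        have h3 := hrun i (by omega)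
        rwa [show left + i = left + 1 + i - 1 by omega] at h3
      have hcond : (decide (0 < left + 1 + i) && (arr.getD (left + 1 + i - 1) 0 == arr.getD (left + 1 + i) 0)) = true := by
        rw [h1, h2]
        simp
      simp only [bGood]
      rw [if_pos hcond]
      simp
    have HB' : left + (k + 1) = 0 ∨ arr.length ≤ left + (k + 1) ∨
        arr.getD (left + (k + 1) - 1) 0 ≠ arr.getD (left + (k + 1)) 0 := by
      by_cases hrn : left + (k + 1) < arr.length
      · right; right
        have hprev : arr.getD (left + (k + 1) - 1) 0 = v := by
          have h1 := hrun k (by omega)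
          rwa [show left + k = left + (k + 1) - 1 by omega] at h1
        rw [hprev]
        exact fun hh => hmax hrn hh.symm
      · right; left; omega
    have hc1no : ¬(decide (0 < left) && (arr.getD (left - 1) 0 == v)) = true := by
      rcases HB with h0 | hn | hne
      · simp [h0]
      · omega
      · intro hcon
        simp only [Bool.and_eq_true, decide_eq_true_eq, beq_iff_eq] at hcon
        rw [← hvv] at hcon
        exact hne hcon.2
    rw [hv, hin, outerA_count arr _ _ (left + (k + 1)) HB', hsplit, List.countP_append,
        List.range'_succ, List.countP_cons, hint]
    have hC1 : (((left + (k + 1) : Nat) : Int) - (left : Int) = v) ↔ ((k : Int) + 1 = v) := by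
      push_cast
      omega
    have hv0 : arr.getD left 0 = v := hvv
    by_cases hveq : (k : Int) + 1 = v
    · -- the run has length exactly v: bGood left reduces to the start-index test
      have hvpos : 1 ≤ v := by omega
      have hvt : v.toNat = k + 1 := by omega
      have hgl : bGood arr left = decide ((left : Int) ≠ v - 1) := by
        simp only [bGood, hv0]
        rw [if_neg hc1no, if_neg, if_neg, if_neg]
        · -- c4: the element right after the window (if any) differs from v
          simp only [Bool.and_eq_true, decide_eq_true_eq, not_and]
          intro hlt
          have h1 : left + v.toNat = left + (k + 1) := by omega
          rw [h1]
          have h2 : left + (k + 1) < arr.length := by omega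
          simp only [beq_iff_eq]
          exact hmax h2
        · -- c3: all elements of the window equal v
          simp only [List.any_eq_true, not_exists, not_and]
          intro j hj
          rw [List.mem_range'] at hj
          obtain ⟨i, hi, rfl⟩ := hj
          rw [hvt] at hi
          simp only [one_mul]
          rw [hrun i (by omega)]
          simp
        · -- c2: v ≥ 1 and the window fits
          simp only [Bool.or_eq_true, decide_eq_true_eq, not_or, not_lt]
          constructor
          · omega
          · omega
      rw [show ((0 : Nat) + if bGood arr left = true then 1 else 0) =
          (if bGood arr left = true then 1 else 0) by omega]
      rw [hgl, if_pos (hC1.mpr hveq)]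
      by_cases hq : (left : Int) + 1 = v
      · rw [if_pos ⟨hC1.mpr hveq, hq⟩, if_neg (by simp; omega)]
        omega
      · rw [if_neg (fun hh => hq hh.2), if_pos (by simp; omega)]
        omega
    · -- the run length differs from v: A does not count it and bGood left is false
      have hgl : bGood arr left = false := by
        simp only [bGood, hv0]
        rw [if_neg hc1no]
        by_cases hc2 : (decide (v < 1) || decide ((left : Int) + v > (arr.length : Int))) = true
        · rw [if_pos hc2]
        · rw [if_neg hc2]
          simp only [Bool.or_eq_true, decide_eq_true_eq, not_or, not_lt] at hc2
          obtain ⟨hv1, hfit⟩ := hc2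
          by_cases hvk : v < (k : Int) + 1
          · -- shorter than the run: the element at offset v is still v, c4 fires
            rw [if_neg, if_pos]
            · simp only [Bool.and_eq_true, decide_eq_true_eq]
              constructor
              · omega
              · have h1 : arr.getD (left + v.toNat) 0 = v := by
                  have := hrun v.toNat (by omega)
                  exact this
                rw [h1]
                simp
            · simp only [List.any_eq_true, not_exists, not_and]
              intro j hj
              rw [List.mem_range'] at hj
              obtain ⟨i, hi, rfl⟩ := hj
              have h1 : i < k + 1 := by omega
              simp only [one_mul]
              rw [hrun i h1]
              simp
          · -- longer than the run: the window contains the first off-run element, c3 fires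
            have hvk2 : (k : Int) + 1 < v := by omega
            rw [if_pos]
            simp only [List.any_eq_true]
            refine ⟨left + (k + 1), ?_, ?_⟩
            · rw [List.mem_range']
              exact ⟨k + 1, by omega, by omega⟩
            · have h2 : left + (k + 1) < arr.length := by omega
              simp only [Bool.not_eq_eq_eq_not, Bool.not_true, beq_eq_false_iff_ne]
              exact hmax h2
      rw [if_neg (fun hh => hveq (hC1.mp hh)), if_neg (fun hh => hveq (hC1.mp hh.1)), hgl]
      push_cast
      ring_nf
termination_by arr.length - left

-- ===== VERDICT (by name: the statement is the Claim_ definition above) =====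
theorem indicators_spec : Claim_equal_indicators := by
  intro arr _
  unfold Spec_indicators indicators indicators_alt
  rw [outerA_count arr 0 0 0 (Or.inl rfl)]
  rw [List.range_eq_range']
  simp
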